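-- pv_equiv track=rewrite | github.com/yennanliu/CS_basics | leetcode_python/Dynamic_Programming/bomb-enemy.py | maxKilledEnemies
-- ===== SOURCE A (Python) =====
-- def maxKilledEnemies(grid):
--     """
--     :type grid: List[List[str]]
--     :rtype: int
--     """
--     def count(x, y):
--         left, right, up, down = 0, 0, 0, 0
--         # left (<-)
--         for i in range(x-1, -1, -1):
--             if grid[i][y] == 'W':
--                 break
--             if grid[i][y] == 'E':
--                 left += 1
--         # right (->)
--         for i in range(x+1, row):
--             if grid[i][y] == 'W':
--                 break
--             if grid[i][y] == 'E':
--                 right += 1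
--         # up (↑)
--         for j in range(y+1, col):
--             if grid[x][j] == 'W':
--                 break
--             if grid[x][j] == 'E':
--                 up += 1
--         # down (↓)
--         for j in range(y-1, -1, -1):
--             if grid[x][j] == 'W':
--                 break
--             if grid[x][j] == 'E':
--                 down += 1
--         return left+right+up+down
--     # base case
--     if not grid: return 0
--     row, col = len(grid), len(grid[0])
--     ans = 0
--     for i in range(row):
--         for j in range(col):
--             if grid[i][j] == '0':
--                 # count the num of enemies
--                 ans = max(ans, count(i, j))
--     return ans
-- ===== SOURCE B (Python) =====
-- def maxKilledEnemies(grid):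
--     """
--     :type grid: List[List[str]]
--     :rtype: int
--     """
--     if not grid or not grid[0]:
--         return 0
--     m, n = len(grid), len(grid[0])
--
--     def up_table(g):
--         # t[i][j] = enemies strictly before row i in column j, back to the nearest wall
--         w = len(g[0])
--         t = [[0] * w]
--         for i in range(1, len(g)):
--             prev, above = t[-1], g[i - 1]
--             t.append([0 if c == 'W' else p + (c == 'E')
--                       for p, c in zip(prev, above)])
--         return t
--
--     tg = [[grid[i][j] for i in range(m)] for j in range(n)]  # transpose
--     up = up_table(grid)
--     down = up_table(grid[::-1])[::-1]
--     left = up_table(tg)                # indexed left[j][i]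
--     right = up_table(tg[::-1])[::-1]   # indexed right[j][i]
--
--     ans = 0
--     for i in range(m):
--         for j in range(n):
--             if grid[i][j] == '0':
--                 ans = max(ans, up[i][j] + down[i][j] + left[j][i] + right[j][i])
--     return ans
-- ===== Notes on version B (the rewrite author's own statement) =====
-- stated objective: alternative
-- what changed: Replaces the per-empty-cell four-directional rescans with four whole-grid dynamic-programming tables of directional enemy counts reset at walls (the down/right tables obtained by running the same scan on the reversed grid/transpose), then one pass takes the max over empty cells.
import Mathlib
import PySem

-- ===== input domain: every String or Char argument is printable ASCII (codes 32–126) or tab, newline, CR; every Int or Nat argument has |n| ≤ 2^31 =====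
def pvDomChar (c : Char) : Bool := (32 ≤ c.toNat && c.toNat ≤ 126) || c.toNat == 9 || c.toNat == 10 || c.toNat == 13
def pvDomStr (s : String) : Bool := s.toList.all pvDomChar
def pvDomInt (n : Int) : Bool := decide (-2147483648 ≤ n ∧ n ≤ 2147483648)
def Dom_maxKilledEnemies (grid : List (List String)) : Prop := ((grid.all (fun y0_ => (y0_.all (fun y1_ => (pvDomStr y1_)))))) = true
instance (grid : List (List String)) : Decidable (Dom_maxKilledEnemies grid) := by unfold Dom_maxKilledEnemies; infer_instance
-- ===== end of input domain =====

-- B replaces A's per-empty-cell four-directional rescans by a different algorithm: four DP tables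
-- of directional enemy counts reset at walls; return values proved equal on Pre_.

-- ===== PORT A =====
-- grid[i][j] with Python int indexing (in range on every access under Pre_)
def pvAGet (grid : List (List String)) (i j : Int) : String :=
  PySem.List.pyGetD (PySem.List.pyGetD grid i []) j ""

-- 'for k in idxs: if cell == W: break; if cell == E: cnt += 1' as recursion over the index list
def pvAScan (f : Int → String) : List Int → Int
  | [] => 0
  | i :: rest =>
    if f i = "W" then 0
    else (if f i = "E" then 1 else 0) + pvAScan f rest

-- the inner helper 'count(x, y)' of A
def pvACount (grid : List (List String)) (row col x y : Int) : Int :=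
  let left  := pvAScan (fun i => pvAGet grid i y) (PySem.List.pyRange (x-1) (-1) (-1))
  let right := pvAScan (fun i => pvAGet grid i y) (PySem.List.pyRange (x+1) row 1)
  let up    := pvAScan (fun j => pvAGet grid x j) (PySem.List.pyRange (y+1) col 1)
  let down  := pvAScan (fun j => pvAGet grid x j) (PySem.List.pyRange (y-1) (-1) (-1))
  left + right + up + down

def maxKilledEnemies (grid : List (List String)) : Int :=
  if grid = [] then 0
  else
    let row : Int := grid.length
    let col : Int := (PySem.List.pyGetD grid 0 []).length
    (PySem.List.pyRange 0 row 1).foldl (fun ans i =>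
      (PySem.List.pyRange 0 col 1).foldl (fun ans j =>
        if pvAGet grid i j = "0" then max ans (pvACount grid row col i j) else ans) ans) 0

-- ===== PORT B =====
def pvBGet (grid : List (List String)) (i j : Int) : String :=
  PySem.List.pyGetD (PySem.List.pyGetD grid i []) j ""

def pvBGetI (t : List (List Int)) (i j : Int) : Int :=
  PySem.List.pyGetD (PySem.List.pyGetD t i []) j 0

-- Source B's up_table: t[i][j] = enemies strictly before row i in column j, reset at walls
def pvBUpTable (g : List (List String)) : List (List Int) :=
  let w := (PySem.List.pyGetD g 0 []).length
  (PySem.List.pyRange 1 (g.length : Int) 1).foldl (fun t i =>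
    let prev := PySem.List.pyGetD t (-1) []
    let above := PySem.List.pyGetD g (i - 1) []
    t ++ [List.zipWith (fun p c => if c = "W" then (0 : Int) else p + (if c = "E" then 1 else 0)) prev above])
    [List.replicate w 0]

def maxKilledEnemies_alt (grid : List (List String)) : Int :=
  if grid = [] ∨ PySem.List.pyGetD grid 0 [] = [] then 0
  else
    let m : Int := grid.length
    let n : Int := (PySem.List.pyGetD grid 0 []).length
    let tg := (PySem.List.pyRange 0 n 1).map (fun j =>
                (PySem.List.pyRange 0 m 1).map (fun i => pvBGet grid i j))  -- transpose
    let up := pvBUpTable grid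
    let down := (pvBUpTable grid.reverse).reverse        -- up_table(grid[::-1])[::-1]
    let left := pvBUpTable tg
    let right := (pvBUpTable tg.reverse).reverse
    (PySem.List.pyRange 0 m 1).foldl (fun ans i =>
      (PySem.List.pyRange 0 n 1).foldl (fun ans j =>
        if pvBGet grid i j = "0" then
          max ans (pvBGetI up i j + pvBGetI down i j + pvBGetI left j i + pvBGetI right j i)
        else ans) ans) 0

-- ===== PRECONDITION & SPEC =====
-- Pre_ excludes exactly the ragged grids with a row shorter than the first row, on which
-- A raises IndexError (its main loop indexes every row at all columns 0..len(grid[0])-1).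
def Pre_maxKilledEnemies (grid : List (List String)) : Prop :=
  ∀ r ∈ grid, (grid.headD []).length ≤ r.length
instance (grid : List (List String)) : Decidable (Pre_maxKilledEnemies grid) := by
  unfold Pre_maxKilledEnemies; infer_instance

def pvWitness_maxKilledEnemies : List (List String) := [["0", "E", "0"], ["W", "0", "E"], ["0", "E", "0"]]

def Spec_maxKilledEnemies (grid : List (List String)) (out : Int) : Prop := out = maxKilledEnemies_alt grid
instance (grid : List (List String)) (out : Int) : Decidable (Spec_maxKilledEnemies grid out) := by unfold Spec_maxKilledEnemies; infer_instance

-- ===== CLAIM (what is proved, stated in full; the proofs are below) =====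
def Claim_equal_maxKilledEnemies : Prop := ∀ (grid : List (List String)), Dom_maxKilledEnemies grid → Pre_maxKilledEnemies grid → Spec_maxKilledEnemies grid (maxKilledEnemies grid)

-- ===== LEMMAS AND PROOFS =====

-- cell (i, j) of the grid, Nat indices (defaulted; in range wherever used)
def pvCell (g : List (List String)) (i j : Nat) : String := (g.getD i []).getD j ""

-- enemies at indices i-1, i-2, … of the column 'f', stopping at the first wall
def pvUpAtF (f : Nat → String) : Nat → Int
  | 0 => 0
  | i+1 => if f i = "W" then 0 else pvUpAtF f i + (if f i = "E" then 1 else 0)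

theorem pvUpAtF_congr (f g : Nat → String) (i : Nat) (h : ∀ k, k < i → f k = g k) :
    pvUpAtF f i = pvUpAtF g i := by
  induction i with
  | zero => rfl
  | succ i ih =>
    simp only [pvUpAtF, h i (Nat.lt_succ_self i), ih (fun k hk => h k (Nat.lt_succ_of_lt hk))]

theorem pvAGet_cast (grid : List (List String)) (i j : Nat) :
    pvAGet grid (i : Int) (j : Int) = pvCell grid i j := by
  simp [pvAGet, pvCell, PySem.List.pyGetD_natCast]

theorem pvBGet_cast (grid : List (List String)) (i j : Nat) :
    pvBGet grid (i : Int) (j : Int) = pvCell grid i j := by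
  simp [pvBGet, pvCell, PySem.List.pyGetD_natCast]

theorem pvRevGetD {α : Type} (l : List α) (d : α) (k : Nat) (h : k < l.length) :
    l.reverse.getD k d = l.getD (l.length - 1 - k) d := by
  rw [List.getD_eq_getElem?_getD, List.getD_eq_getElem?_getD,
    List.getElem?_reverse h]

theorem pvHead0 (g : List (List String)) :
    PySem.List.pyGetD g 0 [] = g.headD [] := by
  cases g with
  | nil => rfl
  | cons a l => simp [PySem.List.pyGetD_zero]

-- A's downward scan (range(x-1, -1, -1)) computes pvUpAtF
theorem pvAScan_countdown (f : Int → String) (c : Nat → String) (x : Nat)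
    (hf : ∀ i : Nat, i < x → f (i : Int) = c i) :
    pvAScan f (PySem.List.pyRange ((x : Int) - 1) (-1) (-1)) = pvUpAtF c x := by
  induction x with
  | zero =>
    rw [PySem.List.pyRange_neg_one_eq_nil (by omega)]; rfl
  | succ x ih =>
    have h1 : ((x + 1 : Nat) : Int) - 1 = (x : Int) := by push_cast; ring
    rw [h1, PySem.List.pyRange_neg_one_cons (by omega)]
    have hcx : f (x : Int) = c x := hf x (Nat.lt_succ_self x)
    simp only [pvAScan, pvUpAtF, hcx,
      ih (fun i hi => hf i (Nat.lt_succ_of_lt hi))]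
    split <;> omega

-- A's upward scan (range(x+1, len, 1)) computes pvUpAtF on the flipped column
theorem pvAScan_countup (f : Int → String) (c : Nat → String) (len : Nat) :
    ∀ (k x : Nat), (∀ i : Nat, i < len → f (i : Int) = c i) → x + 1 + k = len →
    pvAScan f (PySem.List.pyRange ((x : Int) + 1) (len : Int) 1) =
      pvUpAtF (fun t => c (len - 1 - t)) k := by
  intro k
  induction k with
  | zero =>
    intro x hf hx
    rw [PySem.List.pyRange_one_eq_nil (by omega)]; rfl
  | succ k ih =>
    intro x hf hx
    rw [PySem.List.pyRange_one_cons (by omega)]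
    have h1 : ((x : Int) + 1) = ((x + 1 : Nat) : Int) := by push_cast; ring
    have hcx : f ((x : Int) + 1) = c (x + 1) := by rw [h1]; exact hf (x + 1) (by omega)
    have hflip : len - 1 - k = x + 1 := by omega
    simp only [pvAScan, pvUpAtF, hcx, hflip]
    have h2 : ((x : Int) + 1 + 1) = ((x + 1 : Nat) : Int) + 1 := by push_cast; ring
    rw [h2, ih (x + 1) hf (by omega)]
    split <;> omega

-- the row i of Source B's table, as a recurrence
def pvTRow (g : List (List String)) (w : Nat) : Nat → List Int
  | 0 => List.replicate w 0
  | i+1 => List.zipWith (fun p c => if c = "W" then (0 : Int) else p + (if c = "E" then 1 else 0))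
            (pvTRow g w i) (g.getD i [])

theorem pvBUpTable_eq (g : List (List String)) (hg : g ≠ []) :
    pvBUpTable g = (List.range g.length).map (pvTRow g (g.headD []).length) := by
  have hlen : 1 ≤ g.length := List.length_pos_iff.mpr hg
  have hw : (PySem.List.pyGetD g 0 []).length = (g.headD []).length := by
    rw [pvHead0]
  set w := (g.headD []).length with hwdef
  have key : ∀ k : Nat, 1 ≤ k → k ≤ g.length →
      (PySem.List.pyRange 1 (k : Int) 1).foldl (fun t i =>
        t ++ [List.zipWith (fun p c => if c = "W" then (0 : Int) else p + (if c = "E" then 1 else 0))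
          (PySem.List.pyGetD t (-1) []) (PySem.List.pyGetD g (i - 1) [])])
        [List.replicate w 0] = (List.range k).map (pvTRow g w) := by
    intro k
    induction k with
    | zero => omega
    | succ k ih =>
      intro _ hk
      by_cases hk1 : k = 0
      · subst hk1
        rw [PySem.List.pyRange_one_eq_nil (by omega)]
        simp [pvTRow]
      · have hfold := ih (by omega) (by omega)
        have : ((k : Int) + 1) = ((k + 1 : Nat) : Int) := by push_cast; ring
        rw [← this, PySem.List.pyRange_one_succ_right (by omega), List.foldl_append, hfold]
        have hne : (List.range k).map (pvTRow g w) ≠ [] := by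
          simp [List.map_eq_nil_iff, List.range_eq_nil]; omega
        rw [List.range_succ, List.map_append]
        simp only [List.foldl_cons, List.foldl_nil, List.map_cons, List.map_nil]
        congr 1
        have hlast : PySem.List.pyGetD ((List.range k).map (pvTRow g w)) (-1) [] = pvTRow g w (k - 1) := by
          rw [PySem.List.pyGetD_neg_one _ _ hne, List.getLast_eq_getElem]
          simp only [List.getElem_map, List.length_map, List.length_range, List.getElem_range]
        have hgk : PySem.List.pyGetD g ((k : Int) - 1) [] = g.getD (k - 1) [] := by
          have : ((k : Int) - 1) = ((k - 1 : Nat) : Int) := by omega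
          rw [this, PySem.List.pyGetD_natCast]
        rw [hlast, hgk]
        have : k - 1 + 1 = k := by omega
        conv_rhs => rw [← this]
        rfl
  show (PySem.List.pyRange 1 (g.length : Int) 1).foldl _ [List.replicate (PySem.List.pyGetD g 0 []).length 0] = _
  rw [hw]
  exact key g.length hlen le_rfl

theorem pvBUpTable_len (g : List (List String)) (hg : g ≠ []) :
    (pvBUpTable g).length = g.length := by
  rw [pvBUpTable_eq g hg, List.length_map, List.length_range]

theorem pvTRow_len (g : List (List String)) (w c : Nat) (hw : c ≤ w)
    (hrows : ∀ r ∈ g, c ≤ r.length) (i : Nat) (hi : i ≤ g.length) :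
    c ≤ (pvTRow g w i).length := by
  induction i with
  | zero => simpa [pvTRow] using hw
  | succ i ih =>
    have hrow : c ≤ (g.getD i []).length := by
      have : g.getD i [] ∈ g := by
        rw [List.getD_eq_getElem?_getD, List.getElem?_eq_getElem (by omega)]
        exact List.getElem_mem _
      exact hrows _ this
    simp only [pvTRow, List.length_zipWith]
    exact le_min (ih (by omega)) hrow

theorem pvTRow_getD (g : List (List String)) (w c : Nat) (hw : c ≤ w)
    (hrows : ∀ r ∈ g, c ≤ r.length)
    (i j : Nat) (hi : i ≤ g.length) (hj : j < c) :
    (pvTRow g w i).getD j 0 = pvUpAtF (fun k => pvCell g k j) i := by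
  induction i with
  | zero => simp [pvTRow, pvUpAtF, List.getD_eq_getElem?_getD, Nat.lt_of_lt_of_le hj hw]
  | succ i ih =>
    have h1 : c ≤ (pvTRow g w i).length := pvTRow_len g w c hw hrows i (by omega)
    have hrow : c ≤ (g.getD i []).length := by
      have : g.getD i [] ∈ g := by
        rw [List.getD_eq_getElem?_getD, List.getElem?_eq_getElem (by omega)]
        exact List.getElem_mem _
      exact hrows _ this
    have hjlt : j < (List.zipWith (fun p c => if c = "W" then (0 : Int) else p + (if c = "E" then 1 else 0)) (pvTRow g w i) (g.getD i [])).length := by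
      simp only [List.length_zipWith]; omega
    simp only [pvTRow, pvUpAtF]
    rw [List.getD_eq_getElem?_getD, List.getElem?_eq_getElem hjlt]
    simp only [List.getElem_zipWith, Option.getD_some]
    rw [← List.getD_eq_getElem (pvTRow g w i) 0 (by omega),
        ← List.getD_eq_getElem (g.getD i []) "" (by omega), ih (by omega)]
    rfl

-- entry (i, j) of Source B's table
theorem pvBUpTable_entry (g : List (List String)) (c : Nat) (hg : g ≠ [])
    (hrows : ∀ r ∈ g, c ≤ r.length) (i j : Nat) (hi : i < g.length) (hj : j < c) :
    ((pvBUpTable g).getD i []).getD j 0 = pvUpAtF (fun k => pvCell g k j) i := by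
  have hw : c ≤ (g.headD []).length := by
    have : g.headD [] ∈ g := by
      cases g with
      | nil => exact absurd rfl hg
      | cons a l => exact List.mem_cons_self
    exact hrows _ this
  rw [pvBUpTable_eq g hg]
  have : ((List.range g.length).map (pvTRow g (g.headD []).length)).getD i [] =
      pvTRow g (g.headD []).length i := by
    rw [List.getD_eq_getElem?_getD, List.getElem?_eq_getElem (by simpa using hi)]
    simp
  rw [this]
  exact pvTRow_getD g _ c hw hrows i j (by omega) hj

-- the transpose built by B
def pvTG (grid : List (List String)) : List (List String) :=
  (PySem.List.pyRange 0 ((grid.headD []).length : Int) 1).map (fun j =>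
    (PySem.List.pyRange 0 (grid.length : Int) 1).map (fun i => pvBGet grid i j))

theorem pvTG_len (grid : List (List String)) : (pvTG grid).length = (grid.headD []).length := by
  simp [pvTG, PySem.List.length_pyRange_one]

theorem pvTG_rows (grid : List (List String)) :
    ∀ r ∈ pvTG grid, grid.length ≤ r.length := by
  intro r hr
  simp only [pvTG, List.mem_map] at hr
  obtain ⟨a, _, rfl⟩ := hr
  simp [PySem.List.length_pyRange_one]

theorem pvTG_cell (grid : List (List String)) (k i : Nat)
    (hk : k < (grid.headD []).length) (hi : i < grid.length) :
    pvCell (pvTG grid) k i = pvCell grid i k := by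
  have hk' : k < (pvTG grid).length := by rw [pvTG_len]; exact hk
  show ((pvTG grid).getD k []).getD i "" = _
  rw [List.getD_eq_getElem (pvTG grid) [] hk']
  simp only [pvTG, List.getElem_map]
  have hi' : i < ((PySem.List.pyRange 0 (grid.length : Int) 1).map
      (fun i' => pvBGet grid i' ((PySem.List.pyRange 0 ((grid.headD []).length : Int) 1)[k]'(by
        simpa [PySem.List.length_pyRange_one] using hk)))).length := by
    simpa [PySem.List.length_pyRange_one] using hi
  rw [List.getD_eq_getElem _ "" hi']
  simp only [List.getElem_map, PySem.List.getElem_pyRange_one, zero_add]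
  exact pvBGet_cast grid i k

theorem pvPercell (grid : List (List String)) (pre : ∀ r ∈ grid, (grid.headD []).length ≤ r.length)
    (hg : grid ≠ []) (i j : Nat) (hi : i < grid.length) (hj : j < (grid.headD []).length) :
    pvACount grid (grid.length : Int) ((grid.headD []).length : Int) (i : Int) (j : Int) =
      pvBGetI (pvBUpTable grid) (i : Int) (j : Int)
      + pvBGetI ((pvBUpTable grid.reverse).reverse) (i : Int) (j : Int)
      + pvBGetI (pvBUpTable (pvTG grid)) (j : Int) (i : Int)
      + pvBGetI ((pvBUpTable (pvTG grid).reverse).reverse) (j : Int) (i : Int) := by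
  set m := grid.length with hm
  set n := (grid.headD []).length with hn
  -- ==== A's four scans ====
  have hfv : ∀ k : Nat, k < m → pvAGet grid (k : Int) (j : Int) = pvCell grid k j :=
    fun k _ => pvAGet_cast grid k j
  have hfh : ∀ k : Nat, k < n → pvAGet grid (i : Int) (k : Int) = pvCell grid i k :=
    fun k _ => pvAGet_cast grid i k
  have eL := pvAScan_countdown (fun t => pvAGet grid t (j : Int)) (fun k => pvCell grid k j) i
    (fun k hk => hfv k (by omega))
  have eR := pvAScan_countup (fun t => pvAGet grid t (j : Int)) (fun k => pvCell grid k j) m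
    (m - 1 - i) i (fun k hk => hfv k hk) (by omega)
  have eU := pvAScan_countup (fun t => pvAGet grid (i : Int) t) (fun k => pvCell grid i k) n
    (n - 1 - j) j (fun k hk => hfh k hk) (by omega)
  have eD := pvAScan_countdown (fun t => pvAGet grid (i : Int) t) (fun k => pvCell grid i k) j
    (fun k hk => hfh k (by omega))
  -- ==== B's four lookups ====
  have bUp : pvBGetI (pvBUpTable grid) (i : Int) (j : Int) = pvUpAtF (fun k => pvCell grid k j) i := by
    show PySem.List.pyGetD (PySem.List.pyGetD (pvBUpTable grid) (i : Int) []) (j : Int) 0 = _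
    rw [PySem.List.pyGetD_natCast, PySem.List.pyGetD_natCast]
    exact pvBUpTable_entry grid n hg pre i j hi hj
  have bDown : pvBGetI ((pvBUpTable grid.reverse).reverse) (i : Int) (j : Int) =
      pvUpAtF (fun t => pvCell grid (m - 1 - t) j) (m - 1 - i) := by
    show PySem.List.pyGetD (PySem.List.pyGetD _ (i : Int) []) (j : Int) 0 = _
    rw [PySem.List.pyGetD_natCast, PySem.List.pyGetD_natCast]
    have hrev : grid.reverse ≠ [] := by simpa using hg
    have hT : (pvBUpTable grid.reverse).length = m := by
      rw [pvBUpTable_len _ hrev, List.length_reverse]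
    have h1 : (pvBUpTable grid.reverse).reverse.getD i [] =
        (pvBUpTable grid.reverse).getD (m - 1 - i) [] := by
      rw [pvRevGetD _ _ i (by omega), hT]
    rw [h1, pvBUpTable_entry grid.reverse n hrev
      (fun r hr => pre r (List.mem_reverse.mp hr)) (m - 1 - i) j
      (by rw [List.length_reverse]; omega) hj]
    exact pvUpAtF_congr _ _ _ (fun k hk => by
      show ((grid.reverse).getD k []).getD j "" = _
      rw [pvRevGetD _ _ k (by omega)]
      rfl)
  have bLeft : pvBGetI (pvBUpTable (pvTG grid)) (j : Int) (i : Int) =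
      pvUpAtF (fun k => pvCell grid i k) j := by
    show PySem.List.pyGetD (PySem.List.pyGetD _ (j : Int) []) (i : Int) 0 = _
    rw [PySem.List.pyGetD_natCast, PySem.List.pyGetD_natCast]
    have htg : pvTG grid ≠ [] := by
      have hL := pvTG_len grid
      intro h; rw [h] at hL; simp only [List.length_nil] at hL; omega
    rw [pvBUpTable_entry (pvTG grid) m htg (pvTG_rows grid) j i
      (by rw [pvTG_len]; omega) hi]
    exact pvUpAtF_congr _ _ _ (fun k hk => pvTG_cell grid k i (by omega) hi)
  have bRight : pvBGetI ((pvBUpTable (pvTG grid).reverse).reverse) (j : Int) (i : Int) =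
      pvUpAtF (fun t => pvCell grid i (n - 1 - t)) (n - 1 - j) := by
    show PySem.List.pyGetD (PySem.List.pyGetD _ (j : Int) []) (i : Int) 0 = _
    rw [PySem.List.pyGetD_natCast, PySem.List.pyGetD_natCast]
    have htg : pvTG grid ≠ [] := by
      have hL := pvTG_len grid
      intro h; rw [h] at hL; simp only [List.length_nil] at hL; omega
    have hrev : (pvTG grid).reverse ≠ [] := by simpa using htg
    have hT : (pvBUpTable (pvTG grid).reverse).length = n := by
      rw [pvBUpTable_len _ hrev, List.length_reverse, pvTG_len]
    have h1 : (pvBUpTable (pvTG grid).reverse).reverse.getD j [] =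
        (pvBUpTable (pvTG grid).reverse).getD (n - 1 - j) [] := by
      rw [pvRevGetD _ _ j (by omega), hT]
    rw [h1, pvBUpTable_entry (pvTG grid).reverse m hrev
      (fun r hr => pvTG_rows grid r (List.mem_reverse.mp hr)) (n - 1 - j) i
      (by rw [List.length_reverse, pvTG_len]; omega) hi]
    exact pvUpAtF_congr _ _ _ (fun k hk => by
      show ((pvTG grid).reverse.getD k []).getD i "" = _
      rw [pvRevGetD _ _ k (by rw [pvTG_len]; omega)]
      rw [pvTG_len]
      exact pvTG_cell grid (n - 1 - k) i (by omega) hi)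
  simp only [pvACount]
  rw [eL, eR, eU, eD, bUp, bDown, bLeft, bRight]
  ring

theorem pvMain (grid : List (List String)) (pre : ∀ r ∈ grid, (grid.headD []).length ≤ r.length) :
    maxKilledEnemies grid = maxKilledEnemies_alt grid := by
  by_cases hg : grid = []
  · subst hg; rfl
  · have h0 : PySem.List.pyGetD grid 0 [] = grid.headD [] := pvHead0 grid
    by_cases hn0 : (grid.headD []).length = 0
    · have hhead : grid.headD [] = [] := List.length_eq_zero_iff.mp hn0
      rw [maxKilledEnemies, maxKilledEnemies_alt, if_neg hg, if_pos (Or.inr (by rw [h0, hhead]))]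
      simp only [h0, hn0, Nat.cast_zero]
      rw [PySem.List.pyRange_one_eq_nil (le_refl 0)]
      simp only [List.foldl_nil]
      exact List.foldl_fixed _
    · have hguard : ¬(grid = [] ∨ PySem.List.pyGetD grid 0 [] = []) := by
        rintro (h | h)
        · exact hg h
        · rw [h0] at h; rw [h] at hn0; exact hn0 rfl
      rw [maxKilledEnemies, maxKilledEnemies_alt, if_neg hg, if_neg hguard]
      simp only [h0]
      apply PySem.List.foldl_congr_mem
      intro acc x hx
      apply PySem.List.foldl_congr_mem
      intro acc' y hy
      rw [PySem.List.mem_pyRange_one] at hx hy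
      obtain ⟨iN, rfl⟩ : ∃ iN : Nat, x = (iN : Int) :=
        ⟨x.toNat, (Int.toNat_of_nonneg hx.1).symm⟩
      obtain ⟨jN, rfl⟩ : ∃ jN : Nat, y = (jN : Int) :=
        ⟨y.toNat, (Int.toNat_of_nonneg hy.1).symm⟩
      have hiN : iN < grid.length := by exact_mod_cast hx.2
      have hjN : jN < (grid.headD []).length := by exact_mod_cast hy.2
      have hab : pvBGet grid (iN : Int) (jN : Int) = pvAGet grid (iN : Int) (jN : Int) := rfl
      rw [hab]
      by_cases hc : pvAGet grid (iN : Int) (jN : Int) = "0"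
      · rw [if_pos hc, if_pos hc]
        exact congrArg _ (pvPercell grid pre hg iN jN hiN hjN)
      · rw [if_neg hc, if_neg hc]

-- ===== VERDICT (by name: the statement is the Claim_ definition above) =====
theorem maxKilledEnemies_spec : Claim_equal_maxKilledEnemies := by
  intro grid _ pre
  exact pvMain grid pre
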